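-- pv_equiv track=rewrite | github.com/eurecom-s3/syscall2api | api-reconstruction/analysis/analysis_internals.py | apis_same_models
-- ===== SOURCE A (Python) =====
-- def apis_same_models(models):
--     ret = set()
--     i = 0
--     apis = list(models.keys())
--     while i < len(apis):
--         if models[apis[i]] is None:
--             i += 1
--             continue
--         j = i + 1
--         while j < len(apis):
--             if models[apis[j]] is None:
--                 j += 1
--                 continue
--             if len(models[apis[i]] & models[apis[j]]) > 0:
--                 ret.add((apis[i], apis[j]))
--                 break
--             j += 1
--         i += 1
--     return ret
-- ===== SOURCE B (Python) =====
-- def apis_same_models(models):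
--     # Inverted index element -> ascending api indices; per api take the min
--     # "next index" over its elements instead of re-intersecting all later sets.
--     apis = list(models.keys())
--     postings = {}
--     for i, a in enumerate(apis):
--         s = models[a]
--         if s is None:
--             continue
--         for e in s:
--             postings.setdefault(e, []).append(i)
--     ret = set()
--     for i, a in enumerate(apis):
--         s = models[a]
--         if s is None:
--             continue
--         best = None
--         for e in s:
--             for j in postings[e]:
--                 if j > i:
--                     if best is None or j < best:
--                         best = j
--                     break
--         if best is not None:
--             ret.add((a, apis[best]))
--     return ret
-- ===== Notes on version B (the rewrite author's own statement) =====
-- stated objective: faster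
-- what changed: Replaces A's nested quadratic scan that re-intersects every later model set by an inverted index mapping each element to the ascending list of api indices containing it, so each api's partner is the minimum over its elements of the first posting past its own index.
import Mathlib
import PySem

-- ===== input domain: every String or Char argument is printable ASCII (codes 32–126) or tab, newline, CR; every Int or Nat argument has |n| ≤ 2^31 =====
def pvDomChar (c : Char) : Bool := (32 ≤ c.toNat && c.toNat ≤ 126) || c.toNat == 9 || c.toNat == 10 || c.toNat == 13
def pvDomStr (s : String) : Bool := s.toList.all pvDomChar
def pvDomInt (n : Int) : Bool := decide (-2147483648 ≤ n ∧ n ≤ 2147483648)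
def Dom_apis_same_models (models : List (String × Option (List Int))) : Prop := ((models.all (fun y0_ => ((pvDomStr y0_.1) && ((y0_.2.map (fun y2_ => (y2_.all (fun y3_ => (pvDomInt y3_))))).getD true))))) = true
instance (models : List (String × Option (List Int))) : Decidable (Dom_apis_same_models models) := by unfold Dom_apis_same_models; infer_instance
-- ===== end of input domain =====

-- B replaces A's O(n^2) pairwise set intersections by an inverted index
-- element -> ascending api indices, taking per api the min "next index" over
-- its elements (objective: faster; return value only — neither mutates input).

-- ===== PORT A =====
-- inner while loop: first j > i whose model is not None and intersects si
def pvScanA (d : PySem.Dict String (Option (List Int))) (apis : List String) (si : List Int) (j : Nat) : Option Nat :=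
  if _h : j < apis.length then
    match d.getD (apis.getD j "") none with
    | none => pvScanA d apis si (j+1)
    | some sj =>
      if 0 < PySem.Set.len (PySem.Set.inter si sj) then some j
      else pvScanA d apis si (j+1)
  else none
termination_by apis.length - j

-- outer while loop over i with the result set accumulator
def pvOuterA (d : PySem.Dict String (Option (List Int))) (apis : List String) (i : Nat) (ret : PySem.Set (String × String)) : PySem.Set (String × String) :=
  if _h : i < apis.length then
    match d.getD (apis.getD i "") none with
    | none => pvOuterA d apis (i+1) ret
    | some si =>
      match pvScanA d apis si (i+1) with
      | none => pvOuterA d apis (i+1) ret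
      | some j => pvOuterA d apis (i+1) (PySem.Set.add ret (apis.getD i "", apis.getD j ""))
  else ret
termination_by apis.length - i

def apis_same_models (models : List (String × Option (List Int))) : List (String × String) :=
  let d := PySem.Dict.ofList models
  pvOuterA d d.keys 0 PySem.Set.empty

-- ===== PORT B =====
-- 'for j in postings[e]: if j > i: ...; break' — first posting strictly above i
def pvFirstGt (l : List Int) (i : Int) : Option Int :=
  match l with
  | [] => none
  | j :: rest => if i < j then some j else pvFirstGt rest i

-- build of the inverted index postings: element -> indices of apis containing it
def pvPostings (d : PySem.Dict String (Option (List Int))) (apis : List String) : PySem.Dict Int (List Int) :=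
  (PySem.List.enumerate apis 0).foldl (fun P p =>
    match d.getD p.2 none with
    | none => P
    | some s => s.foldl (fun P e => P.modify e [] (· ++ [p.1])) P) PySem.Dict.empty

-- body of 'for e in s' keeping the running minimum candidate 'best'
def pvBestStep (P : PySem.Dict Int (List Int)) (i : Int) (best : Option Int) (e : Int) : Option Int :=
  match pvFirstGt (P.getD e []) i with
  | none => best
  | some j =>
    match best with
    | none => some j
    | some b => if j < b then some j else best

def apis_same_models_alt (models : List (String × Option (List Int))) : List (String × String) :=
  let d := PySem.Dict.ofList models
  let apis := d.keys
  let P := pvPostings d apis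
  (PySem.List.enumerate apis 0).foldl (fun ret p =>
    match d.getD p.2 none with
    | none => ret
    | some s =>
      match s.foldl (pvBestStep P p.1) none with
      | none => ret
      | some j => PySem.Set.add ret (p.2, PySem.List.pyGetD apis j "")) PySem.Set.empty

-- ===== PRECONDITION & SPEC =====
def Spec_apis_same_models (models : List (String × Option (List Int))) (out : List (String × String)) : Prop := out = apis_same_models_alt models
instance (models : List (String × Option (List Int))) (out : List (String × String)) : Decidable (Spec_apis_same_models models out) := by unfold Spec_apis_same_models; infer_instance

-- ===== CLAIM (what is proved, stated in full; the proofs are below) =====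
def Claim_equal_apis_same_models : Prop := ∀ (models : List (String × Option (List Int))), Dom_apis_same_models models → Spec_apis_same_models models (apis_same_models models)


-- ===== LEMMAS AND PROOFS =====

-- abbreviation used only by the proofs: the model stored at index k
def pvMdl (d : PySem.Dict String (Option (List Int))) (apis : List String) (k : Nat) : Option (List Int) :=
  d.getD (apis.getD k "") none

-- index k is a "hit" for the set si: its model exists and intersects si
def pvHit (d : PySem.Dict String (Option (List Int))) (apis : List String) (si : List Int) (k : Nat) : Prop :=
  ∃ sj, pvMdl d apis k = some sj ∧ ∃ x ∈ si, x ∈ sj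

lemma pv_len_inter_pos {si sj : List Int} :
    0 < PySem.Set.len (PySem.Set.inter si sj) ↔ ∃ x ∈ si, x ∈ sj := by
  simp [PySem.Set.len, PySem.Set.inter]

lemma pvScanA_none {d : PySem.Dict String (Option (List Int))} {apis : List String}
    {si : List Int} {j : Nat} (h : pvScanA d apis si j = none) :
    ∀ m, j ≤ m → m < apis.length → ¬ pvHit d apis si m := by
  fun_induction pvScanA d apis si j with
  | case1 j hj heq ih =>
    intro m hjm hmn hhit
    rcases Nat.eq_or_lt_of_le hjm with rfl | hlt
    · obtain ⟨sj, hsj, -⟩ := hhit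
      rw [pvMdl, heq] at hsj; simp at hsj
    · exact ih h m hlt hmn hhit
  | case2 j hj sj heq htest => simp at h
  | case3 j hj sj heq htest ih =>
    intro m hjm hmn hhit
    rcases Nat.eq_or_lt_of_le hjm with rfl | hlt
    · obtain ⟨sj', hsj', hx⟩ := hhit
      rw [pvMdl, heq] at hsj'
      obtain rfl : sj = sj' := Option.some.inj hsj'
      exact htest (pv_len_inter_pos.mpr hx)
    · exact ih h m hlt hmn hhit
  | case4 j hj => intro m hjm hmn; omega

lemma pvScanA_some {d : PySem.Dict String (Option (List Int))} {apis : List String}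
    {si : List Int} {j k : Nat} (h : pvScanA d apis si j = some k) :
    j ≤ k ∧ k < apis.length ∧ pvHit d apis si k ∧ ∀ m, j ≤ m → m < k → ¬ pvHit d apis si m := by
  fun_induction pvScanA d apis si j with
  | case1 j hj heq ih =>
    obtain ⟨h1, h2, h3, h4⟩ := ih h
    refine ⟨by omega, h2, h3, ?_⟩
    intro m hjm hmk hhit
    rcases Nat.eq_or_lt_of_le hjm with rfl | hlt
    · obtain ⟨sj, hsj, -⟩ := hhit
      rw [pvMdl, heq] at hsj; simp at hsj
    · exact h4 m hlt hmk hhit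
  | case2 j hj sj heq htest =>
    obtain rfl : j = k := Option.some.inj h
    exact ⟨le_refl _, hj, ⟨sj, by rw [pvMdl, heq], pv_len_inter_pos.mp htest⟩, by omega⟩
  | case3 j hj sj heq htest ih =>
    obtain ⟨h1, h2, h3, h4⟩ := ih h
    refine ⟨by omega, h2, h3, ?_⟩
    intro m hjm hmk hhit
    rcases Nat.eq_or_lt_of_le hjm with rfl | hlt
    · obtain ⟨sj', hsj', hx⟩ := hhit
      rw [pvMdl, heq] at hsj'
      obtain rfl : sj = sj' := Option.some.inj hsj'
      exact htest (pv_len_inter_pos.mpr hx)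
    · exact h4 m hlt hmk hhit
  | case4 j hj => simp at h

-- contribution of one enumerated api to postings[e]
def pvContrib (d : PySem.Dict String (Option (List Int))) (e : Int) (p : Int × String) : List Int :=
  match d.getD p.2 none with
  | none => []
  | some s => List.replicate (s.count e) p.1

lemma pv_inner_getD (s : List Int) (i e : Int) :
    ∀ P : PySem.Dict Int (List Int),
      (s.foldl (fun P x => P.modify x [] (· ++ [i])) P).getD e []
        = P.getD e [] ++ List.replicate (s.count e) i := by
  induction s with
  | nil => intro P; simp
  | cons x s ih =>
    intro P
    simp only [List.foldl_cons]
    rw [ih, PySem.Dict.getD_modify]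
    by_cases hx : e = x
    · subst hx
      simp [List.replicate_succ, List.append_assoc]
    · simp [hx, List.count_cons,
        show (x == e) = false from beq_eq_false_iff_ne.mpr (fun h => hx h.symm)]

lemma pvPostings_getD (d : PySem.Dict String (Option (List Int))) (apis : List String) (e : Int) :
    (pvPostings d apis).getD e [] = (PySem.List.enumerate apis 0).flatMap (pvContrib d e) := by
  have aux : ∀ (l : List (Int × String)) (P : PySem.Dict Int (List Int)),
      (l.foldl (fun P p =>
        match d.getD p.2 none with
        | none => P
        | some s => s.foldl (fun P e => P.modify e [] (· ++ [p.1])) P) P).getD e []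
      = P.getD e [] ++ l.flatMap (pvContrib d e) := by
    intro l
    induction l with
    | nil => intro P; simp
    | cons p l ih =>
      intro P
      simp only [List.foldl_cons, List.flatMap_cons]
      cases hm : d.getD p.2 none with
      | none => rw [ih]; simp [pvContrib, hm]
      | some s => rw [ih, pv_inner_getD]; simp [pvContrib, hm, List.append_assoc]
  rw [pvPostings, aux]
  rfl

lemma pvPostings_mem (d : PySem.Dict String (Option (List Int))) (apis : List String) (e x : Int) :
    x ∈ (pvPostings d apis).getD e []
      ↔ ∃ k : Nat, k < apis.length ∧ x = (k : Int) ∧ ∃ s, pvMdl d apis k = some s ∧ e ∈ s := by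
  rw [pvPostings_getD]
  rw [List.mem_flatMap]
  constructor
  · rintro ⟨p, hp, hx⟩
    obtain ⟨k, hk, rfl⟩ := (PySem.List.mem_enumerate_iff apis 0 p).mp hp
    rw [pvContrib] at hx
    simp only [] at hx
    cases hm : d.getD (apis[k]) none with
    | none => rw [hm] at hx; simp at hx
    | some s =>
      rw [hm] at hx
      obtain ⟨hcnt, rfl⟩ := List.mem_replicate.mp hx
      refine ⟨k, hk, by simp, s, ?_, List.count_pos_iff.mp (Nat.pos_of_ne_zero hcnt)⟩
      rw [pvMdl, List.getD_eq_getElem apis "" hk, hm]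
  · rintro ⟨k, hk, rfl, s, hs, he⟩
    refine ⟨((k : Int), apis[k]), ?_, ?_⟩
    · exact (PySem.List.mem_enumerate_iff apis 0 _).mpr ⟨k, hk, by simp⟩
    · rw [pvContrib]
      rw [pvMdl, List.getD_eq_getElem apis "" hk] at hs
      simp only [hs]
      exact List.mem_replicate.mpr ⟨(List.count_pos_iff.mpr he).ne', rfl⟩

lemma pv_flatMap_pairwise (l : List (Int × String)) (g : Int × String → List Int)
    (hg : ∀ p x, x ∈ g p → x = p.1) (hl : l.Pairwise fun p q => p.1 < q.1) :
    (l.flatMap g).Pairwise (· ≤ ·) := by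
  induction l with
  | nil => simp
  | cons p l ih =>
    rw [List.flatMap_cons, List.pairwise_append]
    refine ⟨?_, ih hl.of_cons, ?_⟩
    · apply List.pairwise_of_forall_mem_list
      intro a ha b hb
      rw [hg p a ha, hg p b hb]
    · intro a ha b hb
      rw [hg p a ha]
      obtain ⟨q, hq, hbq⟩ := List.mem_flatMap.mp hb
      rw [hg q b hbq]
      exact le_of_lt (List.rel_of_pairwise_cons hl hq)

lemma pvPostings_pairwise (d : PySem.Dict String (Option (List Int))) (apis : List String) (e : Int) :
    ((pvPostings d apis).getD e []).Pairwise (· ≤ ·) := by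
  rw [pvPostings_getD]
  apply pv_flatMap_pairwise
  · intro p x hx
    rw [pvContrib] at hx
    cases hm : d.getD p.2 none with
    | none => rw [hm] at hx; simp at hx
    | some s => rw [hm] at hx; exact (List.mem_replicate.mp hx).2
  · exact PySem.List.pairwise_lt_enumerate apis 0

lemma pvFirstGt_none {L : List Int} {i : Int} (h : pvFirstGt L i = none) :
    ∀ j ∈ L, j ≤ i := by
  induction L with
  | nil => intro j hj; simp at hj
  | cons x L ih =>
    rw [pvFirstGt] at h
    split_ifs at h with hx
    intro j hj
    rcases List.mem_cons.mp hj with rfl | hj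
    · omega
    · exact ih h j hj

lemma pvFirstGt_some {L : List Int} {i j : Int} (hL : L.Pairwise (· ≤ ·))
    (h : pvFirstGt L i = some j) :
    j ∈ L ∧ i < j ∧ ∀ k ∈ L, i < k → j ≤ k := by
  induction L with
  | nil => simp [pvFirstGt] at h
  | cons x L ih =>
    rw [pvFirstGt] at h
    split_ifs at h with hx
    · obtain rfl : x = j := Option.some.inj h
      refine ⟨List.mem_cons_self, hx, fun k hk _ => ?_⟩
      rcases List.mem_cons.mp hk with rfl | hk
      · exact le_refl _
      · exact List.rel_of_pairwise_cons hL hk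
    · obtain ⟨h1, h2, h3⟩ := ih hL.of_cons h
      refine ⟨List.mem_cons_of_mem _ h1, h2, fun k hk hik => ?_⟩
      rcases List.mem_cons.mp hk with rfl | hk
      · omega
      · exact h3 k hk hik

lemma pvBest_none {P : PySem.Dict Int (List Int)} {i : Int} {s : List Int} :
    ∀ {b : Option Int}, s.foldl (pvBestStep P i) b = none →
      b = none ∧ ∀ e ∈ s, pvFirstGt (P.getD e []) i = none := by
  induction s with
  | nil =>
    intro b h
    simp only [List.foldl_nil] at h
    exact ⟨h, by simp⟩
  | cons e s ih =>
    intro b h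
    rw [List.foldl_cons] at h
    obtain ⟨hstep, hrest⟩ := ih h
    rw [pvBestStep] at hstep
    cases hg : pvFirstGt (P.getD e []) i with
    | none =>
      rw [hg] at hstep
      exact ⟨hstep, fun e' he' => by
        rcases List.mem_cons.mp he' with rfl | he'
        · exact hg
        · exact hrest e' he'⟩
    | some j0 =>
      rw [hg] at hstep
      cases b with
      | none => simp at hstep
      | some c => simp only [] at hstep; split_ifs at hstep

lemma pvBest_some {P : PySem.Dict Int (List Int)} {i : Int} {s : List Int} :
    ∀ {b : Option Int} {j : Int}, s.foldl (pvBestStep P i) b = some j →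
      (b = some j ∨ ∃ e ∈ s, pvFirstGt (P.getD e []) i = some j)
      ∧ (∀ k, b = some k → j ≤ k)
      ∧ (∀ e ∈ s, ∀ k, pvFirstGt (P.getD e []) i = some k → j ≤ k) := by
  induction s with
  | nil =>
    intro b j h
    simp only [List.foldl_nil] at h
    subst h
    exact ⟨Or.inl rfl, fun k hk => by simp_all, by simp⟩
  | cons e s ih =>
    intro b j h
    rw [List.foldl_cons] at h
    obtain ⟨hmem, hb, hrest⟩ := ih h
    -- facts about the single step b' = pvBestStep P i b e
    have hmem' : b = some j ∨ ∃ e' ∈ e :: s, pvFirstGt (P.getD e' []) i = some j := by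
      rcases hmem with hm | ⟨e', he', hg⟩
      · rw [pvBestStep] at hm
        cases hg : pvFirstGt (P.getD e []) i with
        | none => rw [hg] at hm; exact Or.inl hm
        | some j0 =>
          rw [hg] at hm
          cases b with
          | none => exact Or.inr ⟨e, List.mem_cons_self, by rw [hg, ← Option.some.inj hm]⟩
          | some c =>
            simp only [] at hm
            split_ifs at hm with hlt
            · exact Or.inr ⟨e, List.mem_cons_self, by rw [hg, ← Option.some.inj hm]⟩
            · exact Or.inl hm
      · exact Or.inr ⟨e', List.mem_cons_of_mem _ he', hg⟩
    have hle_b : ∀ k, b = some k → j ≤ k := by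
      intro k hk
      subst hk
      rw [pvBestStep] at hb
      cases hg : pvFirstGt (P.getD e []) i with
      | none => rw [hg] at hb; exact hb k rfl
      | some j0 =>
        rw [hg] at hb
        simp only [] at hb
        split_ifs at hb with hlt
        · exact le_of_lt (lt_of_le_of_lt (hb j0 rfl) hlt)
        · exact hb k rfl
    refine ⟨hmem', hle_b, fun e' he' k hk => ?_⟩
    rcases List.mem_cons.mp he' with rfl | he'
    · -- e' = e : the step merged pvFirstGt e; show j ≤ k
      rw [pvBestStep] at hb
      rw [hk] at hb
      cases b with
      | none => exact hb k rfl
      | some c =>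
        simp only [] at hb
        split_ifs at hb with hlt
        · exact hb k rfl
        · exact le_trans (hb c rfl) (not_lt.mp hlt)
    · exact hrest e' he' k hk

-- the crux: A's inner scan and B's min-over-postings agree at every index
lemma pv_per_index (d : PySem.Dict String (Option (List Int))) (apis : List String)
    (i : Nat) (si : List Int) :
    (pvScanA d apis si (i+1)).map (fun k => (k : Int))
      = si.foldl (pvBestStep (pvPostings d apis) (i : Int)) none := by
  cases hA : pvScanA d apis si (i+1) with
  | none =>
    cases hB : si.foldl (pvBestStep (pvPostings d apis) (i : Int)) none with
    | none => simp
    | some j =>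
      exfalso
      obtain ⟨hmem, -, -⟩ := pvBest_some hB
      rcases hmem with hm | ⟨e, he, hg⟩
      · simp at hm
      · obtain ⟨hjmem, hij, -⟩ := pvFirstGt_some (pvPostings_pairwise d apis e) hg
        obtain ⟨k, hkn, rfl, s, hsk, hes⟩ := (pvPostings_mem d apis e _).mp hjmem
        have hik : i + 1 ≤ k := by exact_mod_cast hij
        exact pvScanA_none hA k hik hkn ⟨s, hsk, e, he, hes⟩
  | some k =>
    obtain ⟨hik, hkn, ⟨sj, hsj, x, hxsi, hxsj⟩, hmin⟩ := pvScanA_some hA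
    have hkP : (k : Int) ∈ (pvPostings d apis).getD x [] :=
      (pvPostings_mem d apis x _).mpr ⟨k, hkn, rfl, sj, hsj, hxsj⟩
    cases hB : si.foldl (pvBestStep (pvPostings d apis) (i : Int)) none with
    | none =>
      exfalso
      obtain ⟨-, hall⟩ := pvBest_none hB
      have := pvFirstGt_none (hall x hxsi) _ hkP
      have : (i : Int) < (k : Int) := by exact_mod_cast hik
      omega
    | some j =>
      show some ((k : Int)) = some j
      congr 1
      obtain ⟨hmem, -, hlow⟩ := pvBest_some hB
      -- j ≤ k : the candidate k is reachable through element x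
      have hjk : j ≤ (k : Int) := by
        cases hgx : pvFirstGt ((pvPostings d apis).getD x []) (i : Int) with
        | none =>
          have := pvFirstGt_none hgx _ hkP
          have : (i : Int) < (k : Int) := by exact_mod_cast hik
          omega
        | some c =>
          obtain ⟨-, -, hcmin⟩ := pvFirstGt_some (pvPostings_pairwise d apis x) hgx
          have hik' : (i : Int) < (k : Int) := by exact_mod_cast hik
          exact le_trans (hlow x hxsi c hgx) (hcmin _ hkP hik')
      -- k ≤ j : j corresponds to a hit index ≥ i+1, and k is the least one
      have hkj : (k : Int) ≤ j := by
        rcases hmem with hm | ⟨e, he, hg⟩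
        · simp at hm
        · obtain ⟨hjmem, hij, -⟩ := pvFirstGt_some (pvPostings_pairwise d apis e) hg
          obtain ⟨k', hk'n, rfl, s, hsk', hes⟩ := (pvPostings_mem d apis e _).mp hjmem
          have hik' : i + 1 ≤ k' := by exact_mod_cast hij
          by_contra hlt
          have hk'k : k' < k := by exact_mod_cast not_le.mp hlt
          exact hmin k' hik' hk'k ⟨s, hsk', e, he, hes⟩
      omega
  

lemma pv_outer_eq (d : PySem.Dict String (Option (List Int))) (apis : List String) :
    ∀ (i : Nat) (ret : PySem.Set (String × String)),
      pvOuterA d apis i ret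
        = (PySem.List.enumerate (apis.drop i) (i : Int)).foldl (fun ret p =>
            match d.getD p.2 none with
            | none => ret
            | some s =>
              match s.foldl (pvBestStep (pvPostings d apis) p.1) none with
              | none => ret
              | some j => PySem.Set.add ret (p.2, PySem.List.pyGetD apis j "")) ret := by
  intro i ret
  fun_induction pvOuterA d apis i ret with
  | case1 i ret h heq ih =>
    have hgetD : apis.getD i "" = apis[i] := List.getD_eq_getElem apis "" h
    have heq' : d.getD apis[i] none = none := by rw [← hgetD]; exact heq
    rw [List.drop_eq_getElem_cons h, PySem.List.enumerate_cons, List.foldl_cons]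
    simp only [heq']
    rw [ih]
    norm_num
  | case2 i ret h si heq hsc ih =>
    have hgetD : apis.getD i "" = apis[i] := List.getD_eq_getElem apis "" h
    have heq' : d.getD apis[i] none = some si := by rw [← hgetD]; exact heq
    have hf : si.foldl (pvBestStep (pvPostings d apis) (i : Int)) none = none := by
      rw [← pv_per_index, hsc]; rfl
    rw [List.drop_eq_getElem_cons h, PySem.List.enumerate_cons, List.foldl_cons]
    simp only [heq', hf]
    rw [ih]
    norm_num
  | case3 i ret h si heq j hsc ih =>
    have hgetD : apis.getD i "" = apis[i] := List.getD_eq_getElem apis "" h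
    have heq' : d.getD apis[i] none = some si := by rw [← hgetD]; exact heq
    have hf : si.foldl (pvBestStep (pvPostings d apis) (i : Int)) none = some (j : Int) := by
      rw [← pv_per_index, hsc]; rfl
    rw [List.drop_eq_getElem_cons h, PySem.List.enumerate_cons, List.foldl_cons]
    simp only [heq', hf, PySem.List.pyGetD_natCast]
    rw [ih]
    rw [hgetD]
    norm_num
  | case4 i ret h =>
    rw [List.drop_eq_nil_of_le (by omega)]
    simp [PySem.List.enumerate]

-- ===== VERDICT (by name: the statement is the Claim_ definition above) =====
theorem apis_same_models_spec : Claim_equal_apis_same_models := by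
  intro models _
  unfold Spec_apis_same_models apis_same_models apis_same_models_alt
  have := pv_outer_eq (PySem.Dict.ofList models) (PySem.Dict.ofList models).keys 0 PySem.Set.empty
  simpa using this
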